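-- pv_equiv track=rewrite | github.com/Po-Hsuan-Huang/Chatroom | ChatbotModules/dynamic_roles.py | adjust_roles_dynamically
-- ===== SOURCE A (Python) =====
-- def adjust_roles_dynamically(current_roles, conversation_flow):
--     """
--     Dynamically adjust agents' roles based on conversation flow.
--
--     Args:
--         current_roles (dict): Current roles assigned to each agent.
--         conversation_flow (list): Recent segments of the conversation.
--
--     Returns:
--         dict: Updated roles for each agent based on the conversation.
--     """
--     updated_roles = current_roles.copy()
--     # Example logic for dynamic role adjustment
--     for segment in conversation_flow:
--         if "complex discussion" in segment:
--             for agent in updated_roles: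
--                 updated_roles[agent] = "leader" if "leader" in segment else "participant"
--         elif "simple question" in segment:
--             for agent in updated_roles:
--                 updated_roles[agent] = "expert" if "expert" in segment else "assistant"
--     return updated_roles
-- ===== SOURCE B (Python) =====
-- def adjust_roles_dynamically(current_roles, conversation_flow):
--     """Scan the flow backwards: only the last matching segment determines the
--     role, which is then assigned to all agents in a single pass (same result,
--     different traversal)."""
--     for segment in reversed(conversation_flow):
--         if "complex discussion" in segment:
--             role = "leader" if "leader" in segment else "participant"
--             return {agent: role for agent in current_roles}
--         if "simple question" in segment:
--             role = "expert" if "expert" in segment else "assistant"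
--             return {agent: role for agent in current_roles}
--     return current_roles.copy()
-- ===== Notes on version B (the rewrite author's own statement) =====
-- stated objective: alternative
-- what changed: Instead of reassigning every agent for every matching segment, B scans the flow backwards, takes the role from the last matching segment only, and assigns all agents in a single pass.
import Mathlib
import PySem

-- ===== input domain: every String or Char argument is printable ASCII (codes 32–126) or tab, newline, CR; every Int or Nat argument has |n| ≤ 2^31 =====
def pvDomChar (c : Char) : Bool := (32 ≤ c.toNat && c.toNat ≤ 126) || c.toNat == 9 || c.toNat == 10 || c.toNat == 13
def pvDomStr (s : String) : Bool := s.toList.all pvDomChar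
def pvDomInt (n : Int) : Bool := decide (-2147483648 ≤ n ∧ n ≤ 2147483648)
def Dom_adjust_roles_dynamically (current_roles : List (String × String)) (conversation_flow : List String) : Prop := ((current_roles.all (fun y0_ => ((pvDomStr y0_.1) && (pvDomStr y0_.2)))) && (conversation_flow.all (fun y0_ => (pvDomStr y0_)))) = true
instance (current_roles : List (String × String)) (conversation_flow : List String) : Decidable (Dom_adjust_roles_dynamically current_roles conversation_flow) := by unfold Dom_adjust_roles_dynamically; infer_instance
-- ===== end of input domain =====

-- B re-implements A by scanning the conversation backwards for the last matching
-- segment and assigning its role to all agents once (alternative decomposition).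


-- ===== PORT A =====
def adjust_roles_dynamically (current_roles : List (String × String)) (conversation_flow : List String) : List (String × String) :=
  conversation_flow.foldl (fun updated_roles segment =>
    if PySem.Str.isIn "complex discussion" segment then
      updated_roles.map (fun p => (p.1, if PySem.Str.isIn "leader" segment then "leader" else "participant"))
    else if PySem.Str.isIn "simple question" segment then
      updated_roles.map (fun p => (p.1, if PySem.Str.isIn "expert" segment then "expert" else "assistant"))
    else updated_roles) current_roles

-- ===== PORT B =====
-- B: find the last matching segment's role, then assign all agents once
def lastRole : List String → Option String
  | [] => none
  | segment :: rest =>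
    if PySem.Str.isIn "complex discussion" segment then
      some (if PySem.Str.isIn "leader" segment then "leader" else "participant")
    else if PySem.Str.isIn "simple question" segment then
      some (if PySem.Str.isIn "expert" segment then "expert" else "assistant")
    else lastRole rest

def adjust_roles_dynamically_alt (current_roles : List (String × String)) (conversation_flow : List String) : List (String × String) :=
  match lastRole conversation_flow.reverse with
  | some r => current_roles.map (fun p => (p.1, r))
  | none => current_roles

-- ===== PRECONDITION & SPEC =====
def Spec_adjust_roles_dynamically (current_roles : List (String × String)) (conversation_flow : List String) (out : List (String × String)) : Prop := out = adjust_roles_dynamically_alt current_roles conversation_flow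
instance (current_roles : List (String × String)) (conversation_flow : List String) (out : List (String × String)) : Decidable (Spec_adjust_roles_dynamically current_roles conversation_flow out) := by unfold Spec_adjust_roles_dynamically; infer_instance

-- ===== CLAIM (what is proved, stated in full; the proofs are below) =====
def Claim_equal_adjust_roles_dynamically : Prop := ∀ (current_roles : List (String × String)) (conversation_flow : List String), Dom_adjust_roles_dynamically current_roles conversation_flow → Spec_adjust_roles_dynamically current_roles conversation_flow (adjust_roles_dynamically current_roles conversation_flow)

-- ===== LEMMAS AND PROOFS =====

theorem lastRole_append (xs ys : List String) :
    lastRole (xs ++ ys) = match lastRole xs with | some r => some r | none => lastRole ys := by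
  induction xs with
  | nil => simp [lastRole]
  | cons s rest ih =>
    simp only [List.cons_append, lastRole]
    split_ifs <;> simp [ih]

theorem main_lemma (cf : List String) : ∀ (cr : List (String × String)),
    adjust_roles_dynamically cr cf =
      (match lastRole cf.reverse with
       | some r => cr.map (fun p => (p.1, r))
       | none => cr) := by
  induction cf with
  | nil => intro cr; simp [adjust_roles_dynamically, lastRole]
  | cons s rest ih =>
    intro cr
    simp only [adjust_roles_dynamically, List.foldl_cons, List.reverse_cons, lastRole_append]
    have h := ih ((if PySem.Str.isIn "complex discussion" s then
      cr.map (fun p => (p.1, if PySem.Str.isIn "leader" s then "leader" else "participant"))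
    else if PySem.Str.isIn "simple question" s then
      cr.map (fun p => (p.1, if PySem.Str.isIn "expert" s then "expert" else "assistant"))
    else cr))
    simp only [adjust_roles_dynamically] at h
    rw [h]
    cases hr : lastRole rest.reverse with
    | some r => split_ifs <;> simp
    | none => simp [lastRole]; split_ifs <;> simp

-- ===== VERDICT (by name: the statement is the Claim_ definition above) =====
theorem adjust_roles_dynamically_spec : Claim_equal_adjust_roles_dynamically := by
  intro cr cf _
  unfold Spec_adjust_roles_dynamically adjust_roles_dynamically_alt
  exact main_lemma cf cr
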